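-- pv_equiv track=rewrite | github.com/Revi1337/BaekJoon-Coding-Test | 프로그래머스/Lv.1/134240. 푸드 파이트 대회/푸드 파이트 대회.py | solution
-- ===== SOURCE A (Python) =====
-- from collections import deque
--
-- def solution(foods):
--     h1 = []
--     h2 = deque()
--     length = len(foods)
--     for idx in range(length):
--         cnt = foods[idx]
--         while cnt > 1:
--             if cnt // 2:
--                 h1.append(str(idx))
--                 h2.appendleft(str(idx))
--                 cnt -= 2
--     h1.append('0')
--     h1.extend(h2)
--     return "".join(h1)
-- ===== SOURCE B (Python) =====
-- def solution(foods):
--     parts = [str(idx) * (cnt // 2) for idx, cnt in enumerate(foods)]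
--     return "".join(parts) + "0" + "".join(reversed(parts))
-- ===== Notes on version B (the rewrite author's own statement) =====
-- stated objective: simpler
-- what changed: Replaces the per-index while-loop that appends tokens one at a time into a list and a mirrored deque by computing each index's token block in closed form (str(idx) * (cnt // 2)) and deriving the mirror half by reversing the block list afterwards.
import Mathlib
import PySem

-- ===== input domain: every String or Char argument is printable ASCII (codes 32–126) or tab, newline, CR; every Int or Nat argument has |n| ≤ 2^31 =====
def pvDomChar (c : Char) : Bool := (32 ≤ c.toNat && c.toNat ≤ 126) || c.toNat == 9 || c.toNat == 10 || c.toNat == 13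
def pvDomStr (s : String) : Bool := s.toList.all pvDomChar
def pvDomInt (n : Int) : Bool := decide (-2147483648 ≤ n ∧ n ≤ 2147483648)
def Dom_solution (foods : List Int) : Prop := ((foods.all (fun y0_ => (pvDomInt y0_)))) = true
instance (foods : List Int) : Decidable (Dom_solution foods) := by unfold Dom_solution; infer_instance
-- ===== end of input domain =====

-- B builds each index's token block in closed form and derives the mirror half by reversing
-- the block list afterwards, instead of A's lockstep list/deque maintenance (objective: simpler).

-- ===== PORT A =====
-- the inner 'while cnt > 1' loop; when cnt > 1 the guard 'if cnt // 2' is always true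
-- (Python would loop forever otherwise), so the unreachable else returns the state unchanged
def solnInner (idx : Int) (cnt : Int) (h1 : List String) (h2 : List String) :
    List String × List String :=
  if _h : cnt > 1 then
    if PySem.Int.floordiv cnt 2 ≠ 0 then
      solnInner idx (cnt - 2) (h1 ++ [PySem.Int.toStr idx]) (PySem.Int.toStr idx :: h2)
    else (h1, h2)
  else (h1, h2)
termination_by cnt.toNat
decreasing_by omega

def solution (foods : List Int) : String :=
  let length : Int := foods.length
  let st := (PySem.List.pyRange 0 length 1).foldl
    (fun (st : List String × List String) idx =>
      solnInner idx (PySem.List.pyGetD foods idx 0) st.1 st.2) ([], [])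
  PySem.Str.join "" (st.1 ++ ["0"] ++ st.2)

-- ===== PORT B =====
-- Python's  s * n  (empty for n ≤ 0)
def strMul (s : String) (n : Int) : String :=
  PySem.Str.join "" (List.replicate n.toNat s)

def solution_alt (foods : List Int) : String :=
  let parts := (PySem.List.enumerate foods).map
    (fun p => strMul (PySem.Int.toStr p.1) (PySem.Int.floordiv p.2 2))
  PySem.Str.join "" parts ++ "0" ++ PySem.Str.join "" parts.reverse

-- ===== PRECONDITION & SPEC =====
def Spec_solution (foods : List Int) (out : String) : Prop := out = solution_alt foods
instance (foods : List Int) (out : String) : Decidable (Spec_solution foods out) := by unfold Spec_solution; infer_instance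

-- ===== CLAIM (what is proved, stated in full; the proofs are below) =====
def Claim_equal_solution : Prop := ∀ (foods : List Int), Dom_solution foods → Spec_solution foods (solution foods)

-- ===== LEMMAS AND PROOFS =====

theorem pv_inter_nil (l : List (List Char)) : [].intercalate l = l.flatten := by
  induction l with
  | nil => simp [List.intercalate]
  | cons a l ih => cases l <;> simp_all [List.intercalate, List.intersperse]

-- "".join(l) is the concatenation of l
theorem pv_joinE (l : List String) :
    (PySem.Str.join "" l).toList = (l.map String.toList).flatten := by
  simp [PySem.Str.toList_join, PySem.Chars.join, pv_inter_nil]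

theorem pv_rep_comm {α : Type} (k : Nat) (t : α) (h : List α) :
    List.replicate k t ++ t :: h = t :: (List.replicate k t ++ h) := by
  induction k with
  | zero => simp
  | succ k ih => simp [List.replicate_succ, ih]

theorem pv_joinC (l : List (List Char)) : PySem.Chars.join [] l = l.flatten := by
  simp [PySem.Chars.join, pv_inter_nil]

-- the inner while loop appends cnt // 2 copies of str(idx) to h1 and prepends them to h2
theorem pv_inner_eq (idx : Int) (n : Nat) : ∀ (cnt : Int), cnt.toNat ≤ n → ∀ (h1 h2 : List String),
    solnInner idx cnt h1 h2 =
      (h1 ++ List.replicate (PySem.Int.floordiv cnt 2).toNat (PySem.Int.toStr idx),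
       List.replicate (PySem.Int.floordiv cnt 2).toNat (PySem.Int.toStr idx) ++ h2) := by
  induction n with
  | zero =>
    intro cnt hle h1 h2
    have hng : ¬ cnt > 1 := by omega
    have e : PySem.Int.floordiv cnt 2 = cnt / 2 := PySem.Int.floordiv_eq_ediv_of_pos (by omega)
    have hz : (PySem.Int.floordiv cnt 2).toNat = 0 := by rw [e]; omega
    rw [solnInner, dif_neg hng, hz]
    simp
  | succ n ih =>
    intro cnt hle h1 h2
    have e : PySem.Int.floordiv cnt 2 = cnt / 2 := PySem.Int.floordiv_eq_ediv_of_pos (by omega)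
    by_cases hgt : cnt > 1
    · have e' : PySem.Int.floordiv (cnt - 2) 2 = (cnt - 2) / 2 :=
        PySem.Int.floordiv_eq_ediv_of_pos (by omega)
      have hne : PySem.Int.floordiv cnt 2 ≠ 0 := by rw [e]; omega
      have hsucc : (PySem.Int.floordiv cnt 2).toNat
          = (PySem.Int.floordiv (cnt - 2) 2).toNat + 1 := by rw [e, e']; omega
      rw [solnInner, dif_pos hgt, if_pos hne, ih (cnt - 2) (by omega), hsucc]
      simp [pv_rep_comm, List.replicate_succ]
    · have hz : (PySem.Int.floordiv cnt 2).toNat = 0 := by rw [e]; omega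
      rw [solnInner, dif_neg hgt, hz]
      simp

def pvBlocks (l : List (Int × Int)) : List (List String) :=
  l.map (fun p => List.replicate (PySem.Int.floordiv p.2 2).toNat (PySem.Int.toStr p.1))

-- the whole for loop: h1 collects the blocks left to right, h2 collects them right to left
theorem pv_fold_eq (l : List (Int × Int)) : ∀ (h1 h2 : List String),
    l.foldl (fun (st : List String × List String) p => solnInner p.1 p.2 st.1 st.2) (h1, h2)
      = (h1 ++ (pvBlocks l).flatten, (pvBlocks l).reverse.flatten ++ h2) := by
  induction l with
  | nil => intro h1 h2; simp [pvBlocks]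
  | cons p l ih =>
    intro h1 h2
    rw [List.foldl_cons, pv_inner_eq p.1 p.2.toNat p.2 (le_refl _), ih]
    simp [pvBlocks, List.append_assoc]

-- joining the per-block strings equals joining the flattened block list
theorem pv_half_eq (F : List (List String)) :
    (F.map (String.toList ∘ PySem.Str.join "")).flatten
      = (F.map (List.map String.toList)).flatten.flatten := by
  induction F with
  | nil => simp
  | cons b F ih =>
    simp only [List.map_cons, List.flatten_cons, Function.comp_apply, pv_joinE,
      List.flatten_append]
    simp [ih]

theorem pv_str_eq_of_toList {a b : String} (h : a.toList = b.toList) : a = b :=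
  String.ext (by simpa [String.toList] using h)

-- ===== VERDICT (by name: the statement is the Claim_ definition above) =====
theorem solution_spec : Claim_equal_solution := by
  unfold Claim_equal_solution
  intro foods _
  unfold Spec_solution solution solution_alt
  simp only []
  have hfold : (PySem.List.pyRange 0 (foods.length : Int) 1).foldl
      (fun (st : List String × List String) idx =>
        solnInner idx (PySem.List.pyGetD foods idx 0) st.1 st.2) ([], [])
      = (PySem.List.enumerate foods).foldl
        (fun (st : List String × List String) p => solnInner p.1 p.2 st.1 st.2) ([], []) := by
    conv_rhs => rw [PySem.List.enumerate_eq_map_pyRange (xs := foods) (d := 0), List.foldl_map]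
    simp
  rw [hfold, pv_fold_eq]
  have hparts : (PySem.List.enumerate foods).map
      (fun p => strMul (PySem.Int.toStr p.1) (PySem.Int.floordiv p.2 2))
      = (pvBlocks (PySem.List.enumerate foods)).map (PySem.Str.join "") := by
    simp [pvBlocks, strMul, List.map_map]
  rw [hparts]
  apply pv_str_eq_of_toList
  simp only [String.toList_append, PySem.Str.toList_join,
    show "".toList = ([] : List Char) from rfl]
  rw [pv_joinC, pv_joinC, pv_joinC]
  simp [List.flatten_append, List.flatten_cons, List.map_reverse, pv_half_eq]
  rw [← List.map_reverse, ← List.map_reverse, pv_half_eq]
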